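-- pv_equiv track=rewrite | github.com/thomasyang1207/PredictFuture | Scripts/merge.py | mergeDataset
-- ===== SOURCE A (Python) =====
-- def mergeDataset(datasets, countrycodes=None):
-- 	#assume that the keys are countries. datasets are the datasets to be merged. countrycodes are the countries.
--
-- 	datasetByCountry = {}
-- 	allAttributes = []
--
-- 	for dataset in datasets:
-- 		for key,val in dataset[0].items():
-- 			if key not in allAttributes: allAttributes.append(key)
--
-- 	defaultDictionary = {}
-- 	for attribute in allAttributes:
-- 		defaultDictionary[attribute] = '?'
--
-- 	for dataset in datasets:
-- 		for countryDict in dataset: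
-- 			if countryDict['Country'] in datasetByCountry:
-- 				datasetByCountry[countryDict['Country']].update(countryDict)
-- 			else:
-- 				datasetByCountry[countryDict['Country']] = dict(defaultDictionary)
-- 				datasetByCountry[countryDict['Country']].update(countryDict)
--
--
-- 	return [val for key,val in datasetByCountry.items() if len(key) <= 4]
-- ===== SOURCE B (Python) =====
-- def mergeDataset(datasets, countrycodes=None):
-- 	# Group-by reformulation: flatten the rows once, list the distinct countries in
-- 	# first-appearance order, then for each short-coded country build its record by
-- 	# looking up every attribute's last-written value (default '?') — no dict of
-- 	# dicts is ever maintained.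
--
-- 	allAttributes = []
-- 	for dataset in datasets:
-- 		for key in dataset[0]:
-- 			if key not in allAttributes:
-- 				allAttributes.append(key)
--
-- 	rows = [(cd['Country'], list(cd.items())) for dataset in datasets for cd in dataset]
--
-- 	countries = []
-- 	for c, _ in rows:
-- 		if c not in countries:
-- 			countries.append(c)
--
-- 	out = []
-- 	for c in countries:
-- 		if len(c) <= 4:
-- 			pairs = [p for cc, row in rows if cc == c for p in row]
-- 			keys = list(allAttributes)
-- 			for k, _ in pairs:
-- 				if k not in keys:
-- 					keys.append(k)
-- 			rev = list(reversed(pairs))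
-- 			out.append({k: next((v for k2, v in rev if k2 == k), '?') for k in keys})
-- 	return out
-- ===== Notes on version B (the rewrite author's own statement) =====
-- stated objective: alternative
-- what changed: B never maintains A's dict-of-dicts: it flattens the rows once, lists the distinct countries in first-appearance order, and builds each short-coded country's record directly by a reverse scan for every attribute's last-written value (default '?'), i.e. a group-by/last-value-lookup formulation instead of A's incremental per-row dict updating.
import Mathlib
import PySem

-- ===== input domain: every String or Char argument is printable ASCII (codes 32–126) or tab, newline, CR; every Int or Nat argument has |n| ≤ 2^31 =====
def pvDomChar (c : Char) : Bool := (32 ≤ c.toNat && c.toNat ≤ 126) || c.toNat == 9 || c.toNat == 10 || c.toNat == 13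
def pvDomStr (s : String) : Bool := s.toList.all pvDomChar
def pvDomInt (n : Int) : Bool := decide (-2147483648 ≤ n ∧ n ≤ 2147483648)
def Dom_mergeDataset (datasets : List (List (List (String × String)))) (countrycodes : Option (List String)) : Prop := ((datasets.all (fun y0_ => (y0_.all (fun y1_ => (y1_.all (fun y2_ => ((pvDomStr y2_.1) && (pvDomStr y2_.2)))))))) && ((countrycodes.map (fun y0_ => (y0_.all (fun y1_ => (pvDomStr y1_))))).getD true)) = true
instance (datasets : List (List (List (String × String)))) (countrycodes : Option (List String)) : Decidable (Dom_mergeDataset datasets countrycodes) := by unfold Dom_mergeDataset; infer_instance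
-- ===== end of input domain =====

-- B is a group-by reformulation: it flattens the rows once, lists the distinct countries in
-- first-appearance order, and builds each short-coded country's record directly, looking up
-- every attribute's last-written value (default '?') — no dict of dicts is ever maintained.
-- Equivalence of the RETURN value is proved for inputs where Python A returns (Pre_).

-- ===== PORT A =====
-- allAttributes collection: 'for key,val in dataset[0].items(): if key not in allAttributes: append'
def pvAttrsA (datasets : List (List (List (String × String)))) : List String :=
  datasets.foldl (fun attrs dataset =>
    (PySem.Dict.ofList (PySem.List.pyGetD dataset 0 [])).items.foldl
      (fun attrs kv => if kv.1 ∈ attrs then attrs else attrs ++ [kv.1]) attrs) []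

-- 'defaultDictionary[attribute] = "?"' loop
def pvDefaultA (attrs : List String) : PySem.Dict String String :=
  attrs.foldl (fun d a => d.insert a "?") PySem.Dict.empty

-- body of the merge loop: update in place, or copy the default dict and update
def pvStepA (dd : PySem.Dict String String)
    (dbc : PySem.Dict String (PySem.Dict String String)) (cd : List (String × String)) :
    PySem.Dict String (PySem.Dict String String) :=
  let cdd := PySem.Dict.ofList cd
  let c := cdd.getD "Country" ""
  if dbc.contains c then dbc.insert c ((dbc.getD c PySem.Dict.empty).update cdd.items)
  else dbc.insert c (dd.update cdd.items)

def mergeDataset (datasets : List (List (List (String × String)))) (countrycodes : Option (List String)) : List (List (String × String)) :=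
  let allAttributes := pvAttrsA datasets
  let defaultDictionary := pvDefaultA allAttributes
  let datasetByCountry := datasets.foldl (fun dbc dataset => dataset.foldl (pvStepA defaultDictionary) dbc) PySem.Dict.empty
  (datasetByCountry.items.filter (fun p => PySem.Str.len p.1 ≤ 4)).map (fun p => p.2.items)

-- ===== PORT B =====
-- '(cd["Country"], list(cd.items()))' for one row
def pvRowInfo (cd : List (String × String)) : String × List (String × String) :=
  ((PySem.Dict.ofList cd).getD "Country" "", (PySem.Dict.ofList cd).items)

def mergeDataset_alt (datasets : List (List (List (String × String)))) (countrycodes : Option (List String)) : List (List (String × String)) :=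
  -- 'for key in dataset[0]: if key not in allAttributes: allAttributes.append(key)'
  let allAttributes := datasets.foldl (fun attrs dataset =>
    (PySem.Dict.ofList (PySem.List.pyGetD dataset 0 [])).keys.foldl
      (fun attrs k => if k ∈ attrs then attrs else attrs ++ [k]) attrs) []
  -- rows = [(cd['Country'], list(cd.items())) for dataset in datasets for cd in dataset]
  let rows := datasets.flatMap (fun dataset => dataset.map pvRowInfo)
  -- 'for c,_ in rows: if c not in countries: countries.append(c)'
  let countries := rows.foldl (fun cs p => if p.1 ∈ cs then cs else cs ++ [p.1]) []
  -- 'for c in countries: if len(c) <= 4: out.append({k: next((v for k2,v in rev if k2==k), "?") for k in keys})'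
  (countries.filter (fun c => PySem.Str.len c ≤ 4)).map (fun c =>
    let pairs := (rows.filter (fun p => p.1 == c)).flatMap (fun p => p.2)
    let keys := pairs.foldl (fun ks p => if p.1 ∈ ks then ks else ks ++ [p.1]) allAttributes
    let rev := pairs.reverse
    (keys.foldl (fun d k =>
      d.insert k (match rev.find? (fun q => q.1 == k) with
                  | some q => q.2
                  | none => "?")) PySem.Dict.empty).items)

-- ===== PRECONDITION & SPEC =====
-- Pre_ excludes exactly the inputs where Python A raises: an empty dataset (IndexError at
-- dataset[0]) or a row without a 'Country' key (KeyError).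
def Pre_mergeDataset (datasets : List (List (List (String × String)))) (countrycodes : Option (List String)) : Prop :=
  ∀ dataset ∈ datasets, dataset ≠ [] ∧ ∀ cd ∈ dataset, "Country" ∈ cd.map Prod.fst
instance (datasets : List (List (List (String × String)))) (countrycodes : Option (List String)) : Decidable (Pre_mergeDataset datasets countrycodes) := by unfold Pre_mergeDataset; infer_instance

def pvWitness_mergeDataset : (List (List (List (String × String)))) × Option (List String) :=
  ([[[("Country", "US"), ("Pop", "3")]]], none)

def Spec_mergeDataset (datasets : List (List (List (String × String)))) (countrycodes : Option (List String)) (out : List (List (String × String))) : Prop := out = mergeDataset_alt datasets countrycodes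
instance (datasets : List (List (List (String × String)))) (countrycodes : Option (List String)) (out : List (List (String × String))) : Decidable (Spec_mergeDataset datasets countrycodes out) := by unfold Spec_mergeDataset; infer_instance

-- ===== CLAIM (what is proved, stated in full; the proofs are below) =====
def Claim_equal_mergeDataset : Prop := ∀ (datasets : List (List (List (String × String)))) (countrycodes : Option (List String)), Dom_mergeDataset datasets countrycodes → Pre_mergeDataset datasets countrycodes → Spec_mergeDataset datasets countrycodes (mergeDataset datasets countrycodes)

-- ===== LEMMAS AND PROOFS =====

-- the dedup-append loop both programs use is exactly PySem.Set.update
theorem pvFold_eq_update (acc l : List String) :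
    l.foldl (fun ks k => if k ∈ ks then ks else ks ++ [k]) acc = PySem.Set.update acc l := by
  show l.foldl _ acc = l.foldl PySem.Set.add acc
  congr 1
  funext ks k
  rw [PySem.Set.add_eq_ite]

-- 'last value of key k in Q, else "?"' — the value the merged dict stores at k
def pvLastD (Q : List (String × String)) (k : String) : String :=
  match Q.reverse.find? (fun p => p.1 == k) with
  | some p => p.2
  | none => "?"

theorem pvLastD_append_singleton (Q : List (String × String)) (p : String × String) (k : String) :
    pvLastD (Q ++ [p]) k = if p.1 == k then p.2 else pvLastD Q k := by
  simp only [pvLastD, List.reverse_append, List.reverse_singleton, List.singleton_append]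
  by_cases h : (p.1 == k) = true
  · simp [h]
  · rw [Bool.not_eq_true] at h
    simp [h]

theorem pv_any_fst {ν : Type} (S : List String) (f : String → ν) (x : String) :
    (S.map (fun k => (k, f k))).any (fun p => p.1 == x) = decide (x ∈ S) := by
  induction S with
  | nil => simp
  | cons a S ih =>
    simp only [List.map_cons, List.any_cons, ih, List.mem_cons]
    by_cases h : a = x
    · subst h; simp
    · simp [h, Ne.symm h]

theorem pv_find?_self (S : List String) (x : String) (hx : x ∈ S) :
    S.find? (fun c => c == x) = some x := by
  induction S with
  | nil => simp at hx
  | cons a S ih =>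
    rcases List.mem_cons.mp hx with h | h
    · subst h; simp
    · by_cases hax : a = x
      · subst hax; simp
      · rw [List.find?_cons_of_neg (by simpa using hax)]; exact ih h

-- d.update (l₁ ++ l₂) = (d.update l₁).update l₂  (update is a left fold of inserts)
theorem pv_update_append (d : PySem.Dict String String) (l₁ l₂ : List (String × String)) :
    d.update (l₁ ++ l₂) = (d.update l₁).update l₂ :=
  List.foldl_append

-- CHARACTERIZATION of a dict built from a pair list: keys in first-occurrence order,
-- each key paired with its last-written value.
theorem pv_char (Q : List (String × String)) :
    (PySem.Dict.ofList Q).items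
      = (PySem.Set.ofList (Q.map Prod.fst)).map (fun k => (k, pvLastD Q k)) := by
  induction Q using List.reverseRecOn with
  | nil => rfl
  | append_singleton Q p ih =>
    have hof : PySem.Dict.ofList (Q ++ [p]) = (PySem.Dict.ofList Q).insert p.1 p.2 := by
      show (Q ++ [p]).foldl (fun d q => d.insert q.1 q.2) PySem.Dict.empty = _
      rw [List.foldl_append]
      rfl
    have hcont : (PySem.Dict.ofList Q).contains p.1
        = decide (p.1 ∈ PySem.Set.ofList (Q.map Prod.fst)) := by
      show (PySem.Dict.ofList Q).items.any (fun q => q.1 == p.1) = _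
      rw [ih, pv_any_fst]
    rw [hof, PySem.Dict.items_insert, hcont, ih]
    simp only [List.map_append, List.map_cons, List.map_nil, PySem.Set.ofList_append_singleton,
      PySem.Set.add_eq_ite]
    by_cases hmem : p.1 ∈ PySem.Set.ofList (Q.map Prod.fst)
    · simp only [hmem, decide_true, if_true, List.map_map]
      apply List.map_congr_left
      intro k _
      by_cases hk : k = p.1
      · subst hk; simp [pvLastD_append_singleton]
      · have h1 : (k == p.1) = false := by simpa using hk
        have h2 : (p.1 == k) = false := by simpa using (Ne.symm hk)
        simp [Function.comp, pvLastD_append_singleton, h1, h2]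
    · simp only [hmem, decide_false, if_false, Bool.false_eq_true, List.map_append,
        List.map_cons, List.map_nil]
      congr 1
      · apply List.map_congr_left
        intro k hk
        have hk' : k ≠ p.1 := fun h => hmem (h ▸ hk)
        have : (p.1 == k) = false := by simpa using (Ne.symm hk')
        simp [pvLastD_append_singleton, this]
      · simp [pvLastD_append_singleton]

-- the group of a country: all attribute pairs of its rows, in order
def pvGroup (rows : List (String × List (String × String))) (c : String) :
    List (String × String) :=
  (rows.filter (fun p => p.1 == c)).flatMap (fun p => p.2)

theorem pvGroup_append_singleton (rows : List (String × List (String × String)))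
    (r : String × List (String × String)) (c : String) :
    pvGroup (rows ++ [r]) c = pvGroup rows c ++ (if r.1 == c then r.2 else []) := by
  simp only [pvGroup, List.filter_append, List.flatMap_append]
  by_cases h : (r.1 == c) = true <;> simp [h]

theorem pvGroup_of_not_mem (rows : List (String × List (String × String))) (c : String)
    (h : c ∉ rows.map Prod.fst) : pvGroup rows c = [] := by
  have : rows.filter (fun p => p.1 == c) = [] := by
    rw [List.filter_eq_nil_iff]
    intro p hp
    simp only [beq_iff_eq]
    exact fun he => h (he ▸ List.mem_map_of_mem hp)
  simp [pvGroup, this]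

-- A's merge step, phrased on the (country, items) view of a row
def pvStep2 (dd : PySem.Dict String String)
    (dbc : PySem.Dict String (PySem.Dict String String))
    (r : String × List (String × String)) : PySem.Dict String (PySem.Dict String String) :=
  if dbc.contains r.1 then dbc.insert r.1 ((dbc.getD r.1 PySem.Dict.empty).update r.2)
  else dbc.insert r.1 (dd.update r.2)

-- A's nested loop over datasets is the flat loop over the row list B builds
theorem pv_flatten (dd : PySem.Dict String String) :
    ∀ (datasets : List (List (List (String × String))))
      (dbc : PySem.Dict String (PySem.Dict String String)),
      datasets.foldl (fun dbc dataset => dataset.foldl (pvStepA dd) dbc) dbc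
        = (datasets.flatMap (fun dataset => dataset.map pvRowInfo)).foldl (pvStep2 dd) dbc
  | [], _ => rfl
  | ds :: rest, dbc => by
    simp only [List.foldl_cons, List.flatMap_cons, List.foldl_append, List.foldl_map]
    rw [pv_flatten dd rest]
    rfl

-- MAIN INVARIANT: A's dict-of-dicts lists the distinct countries in first-appearance
-- order, each mapped to the defaults updated with that country's whole group.
theorem pv_main (dd : PySem.Dict String String)
    (rows : List (String × List (String × String))) :
    (rows.foldl (pvStep2 dd) PySem.Dict.empty).items
      = (PySem.Set.ofList (rows.map Prod.fst)).map
          (fun c => (c, dd.update (pvGroup rows c))) := by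
  induction rows using List.reverseRecOn with
  | nil => rfl
  | append_singleton rows r ih =>
    rw [List.foldl_append, List.foldl_cons, List.foldl_nil]
    set D := rows.foldl (pvStep2 dd) PySem.Dict.empty with hD
    have hcont : D.contains r.1 = decide (r.1 ∈ PySem.Set.ofList (rows.map Prod.fst)) := by
      show D.items.any (fun q => q.1 == r.1) = _
      rw [ih, pv_any_fst]
    simp only [List.map_append, List.map_cons, List.map_nil,
      PySem.Set.ofList_append_singleton, PySem.Set.add_eq_ite]
    by_cases hmem : r.1 ∈ PySem.Set.ofList (rows.map Prod.fst)
    · -- country already present: in-place overwrite of its entry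
      have hget : D.getD r.1 PySem.Dict.empty = dd.update (pvGroup rows r.1) := by
        show (PySem.Dict.get? D r.1).getD PySem.Dict.empty = _
        show ((D.items.find? (fun q => q.1 == r.1)).map (·.2)).getD PySem.Dict.empty = _
        rw [ih, List.find?_map]
        have : ((fun q => q.1 == r.1) ∘ fun c => (c, dd.update (pvGroup rows c)))
            = fun c => c == r.1 := by funext c; rfl
        rw [this, pv_find?_self _ _ hmem]
        rfl
      rw [pvStep2, if_pos (by rw [hcont]; simpa using hmem),
        PySem.Dict.items_insert_of_contains _ _ (by rw [hcont]; simpa using hmem),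
        ih, hget, List.map_map]
      simp only [hmem, if_true]
      apply List.map_congr_left
      intro c _
      by_cases hc : c = r.1
      · subst hc
        simp [Function.comp, pvGroup_append_singleton, pv_update_append]
      · have h1 : (c == r.1) = false := by simpa using hc
        have h2 : (r.1 == c) = false := by simpa using (Ne.symm hc)
        simp [Function.comp, pvGroup_append_singleton, h2, h1]
    · -- new country: appended with the defaults updated by this row
      have hcont' : D.contains r.1 = false := by rw [hcont]; simpa using hmem
      rw [pvStep2, if_neg (by simp [hcont']),
        PySem.Dict.items_insert_of_not_contains _ _ hcont', ih]
      simp only [hmem, if_false, List.map_append, List.map_cons, List.map_nil]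
      congr 1
      · apply List.map_congr_left
        intro c hc
        have hcr : c ≠ r.1 := fun h => hmem (h ▸ hc)
        have : (r.1 == c) = false := by simpa using (Ne.symm hcr)
        simp [pvGroup_append_singleton, this]
      · have hg : pvGroup rows r.1 = [] := by
          apply pvGroup_of_not_mem
          intro h
          exact hmem (by simpa [PySem.Set.mem_ofList] using h)
        simp [pvGroup_append_singleton, hg]

-- B's attribute loop (over .keys) is A's (over .items, taking firsts)
theorem pv_attrs_eq (datasets : List (List (List (String × String)))) :
    datasets.foldl (fun attrs dataset =>
      (PySem.Dict.ofList (PySem.List.pyGetD dataset 0 [])).keys.foldl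
        (fun attrs k => if k ∈ attrs then attrs else attrs ++ [k]) attrs) []
    = pvAttrsA datasets := by
  unfold pvAttrsA
  congr 1
  funext attrs ds
  simp only [PySem.Dict.keys, List.foldl_map]

theorem pv_inner_nodup (L : List (String × String)) (acc : List String) (h : acc.Nodup) :
    (L.foldl (fun attrs kv => if kv.1 ∈ attrs then attrs else attrs ++ [kv.1]) acc).Nodup := by
  have e : L.foldl (fun attrs kv => if kv.1 ∈ attrs then attrs else attrs ++ [kv.1]) acc
      = PySem.Set.update acc (L.map Prod.fst) := by
    rw [← pvFold_eq_update, List.foldl_map]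
  rw [e]
  exact PySem.Set.nodup_update _ _ h

theorem pv_attrs_nodup (datasets : List (List (List (String × String)))) :
    (pvAttrsA datasets).Nodup := by
  suffices h : ∀ (ds : List (List (List (String × String)))) (acc : List String), acc.Nodup →
      (ds.foldl (fun attrs dataset =>
        (PySem.Dict.ofList (PySem.List.pyGetD dataset 0 [])).items.foldl
          (fun attrs kv => if kv.1 ∈ attrs then attrs else attrs ++ [kv.1]) attrs) acc).Nodup from
    h datasets [] List.nodup_nil
  intro ds
  induction ds with
  | nil => intro acc hacc; exact hacc
  | cons d rest ih =>
    intro acc hacc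
    exact ih _ (pv_inner_nodup _ _ hacc)

-- the last value of k in the defaults-then-P list is its last value in P, else '?'
theorem pv_lastD_split (attrs : List String) (P : List (String × String)) (k : String) :
    pvLastD (attrs.map (fun a => (a, "?")) ++ P) k
      = match P.reverse.find? (fun q => q.1 == k) with
        | some q => q.2
        | none => "?" := by
  unfold pvLastD
  rw [List.reverse_append, List.find?_append]
  cases h : P.reverse.find? (fun q => q.1 == k) with
  | some q => simp
  | none =>
    simp only [Option.none_or]
    cases h2 : ((attrs.map (fun a => (a, "?"))).reverse).find? (fun q => q.1 == k) with
    | none => simp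
    | some q =>
      have hq : q ∈ (attrs.map (fun a => (a, "?"))).reverse := List.mem_of_find?_eq_some h2
      have hq2 : q.2 = "?" := by
        rw [List.mem_reverse] at hq
        rcases List.mem_map.mp hq with ⟨a, _, rfl⟩
        rfl
      simp [hq2]

-- PER-COUNTRY: the merged dict's items are exactly B's rebuilt record
theorem pv_country (attrs : List String) (hattrs : attrs.Nodup) (P : List (String × String)) :
    ((pvDefaultA attrs).update P).items
      = ((P.foldl (fun ks p => if p.1 ∈ ks then ks else ks ++ [p.1]) attrs).foldl
          (fun d k => d.insert k (match P.reverse.find? (fun q => q.1 == k) with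
                                  | some q => q.2
                                  | none => "?")) PySem.Dict.empty).items := by
  have hdd : pvDefaultA attrs = PySem.Dict.ofList (attrs.map (fun a => (a, "?"))) := by
    show attrs.foldl (fun d a => d.insert a "?") PySem.Dict.empty = _
    rw [show PySem.Dict.ofList (attrs.map (fun a => (a, "?")))
        = (attrs.map (fun a => (a, "?"))).foldl (fun d p => d.insert p.1 p.2) PySem.Dict.empty
        from rfl, List.foldl_map]
  have hL : (pvDefaultA attrs).update P
      = PySem.Dict.ofList (attrs.map (fun a => (a, "?")) ++ P) := by
    rw [hdd]
    exact (pv_update_append PySem.Dict.empty (attrs.map (fun a => (a, "?"))) P).symm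
  have hkeys : P.foldl (fun ks p => if p.1 ∈ ks then ks else ks ++ [p.1]) attrs
      = PySem.Set.update attrs (P.map Prod.fst) := by
    rw [← pvFold_eq_update, List.foldl_map]
  have hset : PySem.Set.ofList ((attrs.map (fun a => (a, "?")) ++ P).map Prod.fst)
      = PySem.Set.update attrs (P.map Prod.fst) := by
    rw [List.map_append, List.map_map, PySem.Set.ofList_append]
    congr 1
    rw [show (Prod.fst ∘ fun a => (a, "?")) = fun (a : String) => a from rfl, List.map_id']
    exact PySem.Set.ofList_eq_self_of_nodup _ hattrs
  have hnodup : (P.foldl (fun ks p => if p.1 ∈ ks then ks else ks ++ [p.1]) attrs).Nodup := by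
    rw [hkeys]
    exact PySem.Set.nodup_update _ _ hattrs
  rw [hL, pv_char, hset, ← hkeys]
  set keys := P.foldl (fun ks p => if p.1 ∈ ks then ks else ks ++ [p.1]) attrs with hk
  have hbuild : (keys.foldl
        (fun d k => d.insert k (match P.reverse.find? (fun q => q.1 == k) with
                                | some q => q.2
                                | none => "?")) PySem.Dict.empty).items
      = keys.map (fun k => (k, match P.reverse.find? (fun q => q.1 == k) with
                               | some q => q.2
                               | none => "?")) := by
    simpa using PySem.Dict.items_foldl_insert_fresh keys (fun a => a)
      (fun k => match P.reverse.find? (fun q => q.1 == k) with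
                | some q => q.2
                | none => "?") PySem.Dict.empty
      (fun a _ => PySem.Dict.contains_empty a) (by simpa using hnodup)
  rw [hbuild]
  apply List.map_congr_left
  intro k _
  rw [pv_lastD_split]

-- ===== VERDICT (by name: the statement is the Claim_ definition above) =====
theorem mergeDataset_spec : Claim_equal_mergeDataset := by
  intro datasets countrycodes _ _
  unfold Spec_mergeDataset
  dsimp only [mergeDataset, mergeDataset_alt]
  rw [pv_attrs_eq]
  rw [pv_flatten (pvDefaultA (pvAttrsA datasets)) datasets,
      pv_main (pvDefaultA (pvAttrsA datasets))]
  have hcountries : (datasets.flatMap (fun dataset => dataset.map pvRowInfo)).foldl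
        (fun cs p => if p.1 ∈ cs then cs else cs ++ [p.1]) []
      = PySem.Set.ofList ((datasets.flatMap (fun dataset => dataset.map pvRowInfo)).map Prod.fst) := by
    rw [show (datasets.flatMap (fun dataset => dataset.map pvRowInfo)).foldl
          (fun cs p => if p.1 ∈ cs then cs else cs ++ [p.1]) []
        = ((datasets.flatMap (fun dataset => dataset.map pvRowInfo)).map Prod.fst).foldl
            (fun ks k => if k ∈ ks then ks else ks ++ [k]) []
        from by rw [List.foldl_map], pvFold_eq_update]
    rfl
  rw [hcountries, List.filter_map, List.map_map]
  rw [show ((fun p => decide (PySem.Str.len p.1 ≤ 4)) ∘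
        (fun c => (c, (pvDefaultA (pvAttrsA datasets)).update
          (pvGroup (datasets.flatMap (fun dataset => dataset.map pvRowInfo)) c))))
      = fun c => decide (PySem.Str.len c ≤ 4) from rfl]
  apply List.map_congr_left
  intro c _
  exact pv_country (pvAttrsA datasets) (pv_attrs_nodup datasets)
    (pvGroup (datasets.flatMap (fun dataset => dataset.map pvRowInfo)) c)
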